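-- pv_equiv track=rewrite | github.com/MrBrantCode/unitest_baseline | mut_generate/mist_train_cf/cf_19256/solution.py | sum_of_squares_of_primes
-- ===== SOURCE A (Python) =====
-- def sum_of_squares_of_primes(numbers):
--     """
--     Calculate the sum of the squares of all prime numbers in the list
--     that are not divisible by both 3 and 5.
--
--     Args:
--         numbers (list): A list of integers.
--
--     Returns:
--         int: The sum of the squares of the prime numbers.
--     """
--
--     def is_prime(n):
--         """Check if a number is prime."""
--         if n < 2:
--             return False
--         for i in range(2, int(n**0.5) + 1):
--             if n % i == 0:
--                 return False
--         return True
--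
--     def is_divisible_by_3_and_5(n):
--         """Check if a number is divisible by both 3 and 5."""
--         return n % 3 == 0 and n % 5 == 0
--
--     return sum([n**2 for n in numbers if is_prime(n) and not is_divisible_by_3_and_5(n)])
-- ===== SOURCE B (Python) =====
-- def sum_of_squares_of_primes(numbers):
--     """
--     Sum of squares of the primes in the list (a prime is never divisible by
--     both 3 and 5, so A's extra guard is vacuous).  Different decomposition:
--     count duplicates in a dict first, test each DISTINCT value once with an
--     odd-step trial division, and weight its square by its multiplicity.
--     """
--
--     def _is_prime(n):
--         if n < 2:
--             return False
--         if n % 2 == 0: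
--             return n == 2
--         d = 3
--         while d * d <= n:
--             if n % d == 0:
--                 return False
--             d += 2
--         return True
--
--     counts = {}
--     for n in numbers:
--         counts[n] = counts.get(n, 0) + 1
--     total = 0
--     for n, c in counts.items():
--         if _is_prime(n):
--             total += c * n * n
--     return total
-- ===== Notes on version B (the rewrite author's own statement) =====
-- stated objective: alternative
-- what changed: B counts duplicates in a dict first and trial-divides each distinct value only once using odd divisors only (after a single parity check), dropping A's divisible-by-15 guard, which is provably vacuous for primes.
import Mathlib
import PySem

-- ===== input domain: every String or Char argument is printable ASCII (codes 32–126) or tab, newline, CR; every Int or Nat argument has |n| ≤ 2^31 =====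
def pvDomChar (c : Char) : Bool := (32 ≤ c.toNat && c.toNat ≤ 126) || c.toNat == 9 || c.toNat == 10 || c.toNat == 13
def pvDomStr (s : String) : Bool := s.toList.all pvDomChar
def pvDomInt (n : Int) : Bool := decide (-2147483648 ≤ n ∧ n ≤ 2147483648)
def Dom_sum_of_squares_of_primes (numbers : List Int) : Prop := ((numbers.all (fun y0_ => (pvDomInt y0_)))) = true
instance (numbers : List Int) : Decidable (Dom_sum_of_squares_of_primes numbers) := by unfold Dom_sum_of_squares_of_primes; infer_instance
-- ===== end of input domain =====

-- B counts duplicates in a dict and trial-divides each distinct value once (odd divisors only);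
-- A's divisible-by-both-3-and-5 guard is dropped because it never fires on a prime.

-- ===== PORT A =====
-- is_prime: trial division over range(2, int(n**0.5)+1); int(n**0.5) equals Nat.sqrt exactly for 0 ≤ n ≤ 2^31
def pvIsPrimeA (n : Int) : Bool :=
  if n < 2 then false
  else (PySem.List.pyRange 2 ((Nat.sqrt n.toNat : Int) + 1)).all (fun i => !(PySem.Int.mod n i == 0))

def pvDiv35 (n : Int) : Bool := PySem.Int.mod n 3 == 0 && PySem.Int.mod n 5 == 0

def sum_of_squares_of_primes (numbers : List Int) : Int :=
  ((numbers.filter (fun n => pvIsPrimeA n && !pvDiv35 n)).map (fun n => n ^ 2)).sum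

-- ===== PORT B =====
-- the 'while d * d <= n: … d += 2' loop of Source B's _is_prime
def pvTrial (n : Int) (d : Nat) : Bool :=
  if h : (d : Int) * d ≤ n then
    (if PySem.Int.mod n d == 0 then false else pvTrial n (d + 2))
  else true
termination_by n.toNat + 2 - d
decreasing_by
  have hd : (d : Int) ≤ n ∨ d = 0 := by
    rcases Nat.eq_zero_or_pos d with h0 | h0
    · right; exact h0
    · left
      calc (d : Int) ≤ (d : Int) * d := le_mul_of_one_le_right (by positivity) (by exact_mod_cast h0)
        _ ≤ n := h
  omega

def pvIsPrimeB (n : Int) : Bool :=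
  if n < 2 then false
  else if PySem.Int.mod n 2 == 0 then n == 2
  else pvTrial n 3

def sum_of_squares_of_primes_alt (numbers : List Int) : Int :=
  let counts := numbers.foldl (fun d x => d.insert x (d.getD x 0 + 1)) (PySem.Dict.empty : PySem.Dict Int Int)
  counts.items.foldl (fun total p => if pvIsPrimeB p.1 then total + p.2 * p.1 * p.1 else total) 0

-- ===== PRECONDITION & SPEC =====
def Spec_sum_of_squares_of_primes (numbers : List Int) (out : Int) : Prop := out = sum_of_squares_of_primes_alt numbers
instance (numbers : List Int) (out : Int) : Decidable (Spec_sum_of_squares_of_primes numbers out) := by unfold Spec_sum_of_squares_of_primes; infer_instance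

-- ===== CLAIM (what is proved, stated in full; the proofs are below) =====
def Claim_equal_sum_of_squares_of_primes : Prop := ∀ (numbers : List Int), Dom_sum_of_squares_of_primes numbers → Spec_sum_of_squares_of_primes numbers (sum_of_squares_of_primes numbers)

-- ===== LEMMAS AND PROOFS =====

-- "n has no divisor k with 2 ≤ k and k*k ≤ n"
def pvNoDiv (n : Int) : Prop := ∀ k : Nat, 2 ≤ k → (k : Int) * k ≤ n → ¬ ((k : Int) ∣ n)

theorem pvIsPrimeA_iff (n : Int) (hn : 2 ≤ n) : pvIsPrimeA n = true ↔ pvNoDiv n := by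
  have h2 : ¬ n < 2 := by omega
  rw [pvIsPrimeA, if_neg h2, List.all_eq_true]
  constructor
  · intro h k hk2 hkk hdvd
    have hmem : (k : Int) ∈ PySem.List.pyRange 2 ((Nat.sqrt n.toNat : Int) + 1) := by
      rw [PySem.List.mem_pyRange_one]
      have hsq : k ≤ Nat.sqrt n.toNat := Nat.le_sqrt.mpr (by
        have : (k : Int) * k ≤ (n.toNat : Int) := by omega
        exact_mod_cast this)
      refine ⟨by omega, ?_⟩
      have hlt : k < Nat.sqrt n.toNat + 1 := by omega
      exact_mod_cast hlt
    have := h _ hmem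
    simp only [Bool.not_eq_eq_eq_not, Bool.not_true, beq_eq_false_iff_ne] at this
    exact this ((PySem.Int.mod_eq_zero_iff_dvd n k).mpr hdvd)
  · intro h i hi
    rw [PySem.List.mem_pyRange_one] at hi
    obtain ⟨hi2, hiu⟩ := hi
    have hk : ∃ k : Nat, (k : Int) = i := ⟨i.toNat, by omega⟩
    obtain ⟨k, rfl⟩ := hk
    have hsq : k ≤ Nat.sqrt n.toNat := by exact_mod_cast Int.le_of_lt_add_one hiu
    have hkk : (k : Int) * k ≤ n := by
      have h1 := Nat.le_sqrt.mp hsq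
      have h2 : ((k * k : Nat) : Int) ≤ ((n.toNat : Nat) : Int) := by exact_mod_cast h1
      push_cast at h2; omega
    have := h k (by exact_mod_cast hi2) hkk
    simp only [Bool.not_eq_eq_eq_not, Bool.not_true, beq_eq_false_iff_ne]
    intro hm; exact this ((PySem.Int.mod_eq_zero_iff_dvd n k).mp hm)

theorem pvTrial_iff (n : Int) (d : Nat) :
    pvTrial n d = true ↔
      ∀ k : Nat, d ≤ k → (k - d) % 2 = 0 → (k : Int) * k ≤ n → ¬ ((k : Int) ∣ n) := by
  induction d using pvTrial.induct (n := n) with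
  | case1 d h hm =>
    rw [pvTrial, dif_pos h, if_pos hm]
    simp only [Bool.false_eq_true, false_iff]
    intro hall
    exact hall d le_rfl (by omega) h ((PySem.Int.mod_eq_zero_iff_dvd n d).mp (by simpa using hm))
  | case2 d h hm ih =>
    rw [pvTrial, dif_pos h, if_neg hm, ih]
    constructor
    · intro hall k hdk hpar hkk
      rcases eq_or_lt_of_le hdk with rfl | hlt
      · intro hdvd
        exact hm (by simpa using (PySem.Int.mod_eq_zero_iff_dvd n _).mpr hdvd)
      · exact hall k (by omega) (by omega) hkk
    · intro hall k hdk hpar hkk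
      exact hall k (by omega) (by omega) hkk
  | case3 d h =>
    rw [pvTrial, dif_neg h]
    simp only [true_iff]
    intro k hdk hpar hkk
    exfalso
    have hdk' : (d : Int) ≤ k := by exact_mod_cast hdk
    have : (d : Int) * d ≤ (k : Int) * k := mul_le_mul hdk' hdk' (by positivity) (by positivity)
    omega

theorem pvIsPrimeB_iff (n : Int) (hn : 2 ≤ n) : pvIsPrimeB n = true ↔ pvNoDiv n := by
  rw [pvIsPrimeB, if_neg (by omega : ¬ n < 2)]
  by_cases he : PySem.Int.mod n 2 == 0
  · rw [if_pos he]
    have h2 : (2 : Int) ∣ n := (PySem.Int.mod_eq_zero_iff_dvd n 2).mp (by simpa using he)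
    by_cases h2n : n = 2
    · subst h2n
      simp only [beq_self_eq_true, true_iff]
      intro k hk hkk
      exfalso
      have : (k : Int) * k ≥ 2 * 2 := by
        have : (2 : Int) ≤ k := by exact_mod_cast hk
        nlinarith
      omega
    · have hn4 : 4 ≤ n := by
        rcases h2 with ⟨c, rfl⟩; omega
      simp only [beq_iff_eq, h2n, false_iff]
      intro hall
      exact hall 2 le_rfl (by push_cast; omega) (by exact_mod_cast h2)
  · rw [if_neg he, pvTrial_iff]
    constructor
    · intro hall k hk2 hkk hdvd
      by_cases hke : k % 2 = 0
      · have h2k : (2 : Int) ∣ (k : Int) := by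
          have : 2 ∣ k := Nat.dvd_of_mod_eq_zero hke
          exact_mod_cast this
        exact he (by simpa using (PySem.Int.mod_eq_zero_iff_dvd n 2).mpr (dvd_trans h2k hdvd))
      · exact hall k (by omega) (by omega) hkk hdvd
    · intro hall k hk3 hpar hkk
      exact hall k (by omega) hkk

theorem pvGuard (n : Int) (hn : 2 ≤ n) (hp : pvNoDiv n) : pvDiv35 n = false := by
  rw [pvDiv35]
  by_contra hc
  have htrue : (PySem.Int.mod n 3 == 0 && PySem.Int.mod n 5 == 0) = true := by
    cases h : (PySem.Int.mod n 3 == 0 && PySem.Int.mod n 5 == 0) with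
    | false => exact absurd h hc
    | true => rfl
  have hand := (Bool.and_eq_true _ _).mp htrue
  have h3 : (3 : Int) ∣ n := (PySem.Int.mod_eq_zero_iff_dvd n 3).mp (by simpa using hand.1)
  have h5 : (5 : Int) ∣ n := (PySem.Int.mod_eq_zero_iff_dvd n 5).mp (by simpa using hand.2)
  have h15 : (15 : Int) ∣ n := by
    have hco : IsCoprime (3 : Int) 5 := by
      rw [Int.isCoprime_iff_gcd_eq_one]; decide
    simpa using hco.mul_dvd h3 h5
  have hn15 : 15 ≤ n := Int.le_of_dvd (by omega) h15
  exact hp 3 (by omega) (by push_cast; omega) (by exact_mod_cast h3)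

theorem pvPrime_eq (n : Int) : (pvIsPrimeA n && !pvDiv35 n) = pvIsPrimeB n := by
  by_cases hn : n < 2
  · have ha : pvIsPrimeA n = false := by rw [pvIsPrimeA, if_pos hn]
    have hb : pvIsPrimeB n = false := by rw [pvIsPrimeB, if_pos hn]
    simp [ha, hb]
  · have hn2 : 2 ≤ n := by omega
    by_cases hA : pvIsPrimeA n = true
    · have hnd := (pvIsPrimeA_iff n hn2).mp hA
      have hB : pvIsPrimeB n = true := (pvIsPrimeB_iff n hn2).mpr hnd
      have hg := pvGuard n hn2 hnd
      simp [hA, hB, hg]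
    · have hA' : pvIsPrimeA n = false := by
        cases h : pvIsPrimeA n
        · rfl
        · exact absurd h hA
      have hB : pvIsPrimeB n = false := by
        cases h : pvIsPrimeB n
        · rfl
        · exact absurd ((pvIsPrimeA_iff n hn2).mpr ((pvIsPrimeB_iff n hn2).mp h)) hA
      simp [hA', hB]

-- sum of f over a filter, as an if-sum over the whole list
theorem pvSumFilter {α : Type} (l : List α) (p : α → Bool) (f : α → Int) :
    ((l.filter p).map f).sum = (l.map fun x => if p x then f x else 0).sum := by
  induction l with
  | nil => rfl
  | cons x t ih =>
    by_cases h : p x = true <;> simp [h, ih]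

theorem pvSumSingle (S : List Int) (x : Int) (hx : x ∈ S) (hnd : S.Nodup) (v : Int → Int) :
    (S.map fun k => if k = x then v k else 0).sum = v x := by
  induction S with
  | nil => cases hx
  | cons y t ih =>
    rcases List.mem_cons.mp hx with rfl | hxt
    · have hxnt : x ∉ t := (List.nodup_cons.mp hnd).1
      have hz : ∀ k ∈ t, (if k = x then v k else 0) = 0 := by
        intro k hk; have : k ≠ x := fun e => hxnt (e ▸ hk); simp [this]
      simp [List.map_congr_left hz]
    · have hy : y ≠ x := by
        rintro rfl; exact (List.nodup_cons.mp hnd).1 hxt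
      simp [hy, ih hxt (List.nodup_cons.mp hnd).2]

theorem pvSumCount (l : List Int) (g : Int → Int) :
    ((PySem.Set.ofList l).map fun k => (l.count k : Int) * g k).sum = (l.map g).sum := by
  induction l using List.reverseRecOn with
  | nil => rfl
  | append_singleton l x ih =>
    have hS : PySem.Set.ofList (l ++ [x]) = PySem.Set.add (PySem.Set.ofList l) x := by
      rw [PySem.Set.ofList_eq_foldl, List.foldl_append, ← PySem.Set.ofList_eq_foldl]
      rfl
    have hcount : ∀ k : Int, (((l ++ [x]).count k : Int)) = (l.count k : Int) + (if k = x then 1 else 0) := by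
      intro k
      rw [List.count_append]
      by_cases hk : k = x
      · simp [hk]
      · have h0 : List.count k [x] = 0 := List.count_eq_zero.mpr (by simp [hk])
        simp [h0, hk]
    have hrhs : ((l ++ [x]).map g).sum = (l.map g).sum + g x := by
      simp
    rw [hS, hrhs, ← ih]
    by_cases hx : x ∈ l
    · have hmem : x ∈ PySem.Set.ofList l := (PySem.Set.mem_ofList l x).mpr hx
      have hadd : PySem.Set.add (PySem.Set.ofList l) x = PySem.Set.ofList l := by
        simp [PySem.Set.add, hx]
      rw [hadd]
      have hsplit : ((PySem.Set.ofList l).map fun k => ((l ++ [x]).count k : Int) * g k).sum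
          = ((PySem.Set.ofList l).map fun k => (l.count k : Int) * g k).sum
            + ((PySem.Set.ofList l).map fun k => if k = x then g k else 0).sum := by
        rw [← PySem.List.sum_map_add_int]
        apply congrArg
        apply List.map_congr_left
        intro k hk
        rw [hcount k]
        by_cases hkx : k = x
        · simp [hkx]; ring
        · simp [hkx]
      rw [hsplit, pvSumSingle _ _ hmem (PySem.Set.nodup_ofList l) g]
    · have hmem' : x ∉ PySem.Set.ofList l := fun h => hx ((PySem.Set.mem_ofList l x).mp h)
      have hadd : PySem.Set.add (PySem.Set.ofList l) x = PySem.Set.ofList l ++ [x] := by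
        simp [PySem.Set.add, hx]
      have hxl : x ∉ l := hx
      rw [hadd, List.map_append, List.sum_append]
      have h1 : ((PySem.Set.ofList l).map fun k => ((l ++ [x]).count k : Int) * g k).sum
          = ((PySem.Set.ofList l).map fun k => (l.count k : Int) * g k).sum := by
        apply congrArg
        apply List.map_congr_left
        intro k hk
        have hkx : k ≠ x := fun e => hmem' (e ▸ hk)
        rw [hcount k]
        simp [hkx]
      have h2 : (([x].map fun k => ((l ++ [x]).count k : Int) * g k)).sum = g x := by
        have hc0 : (l.count x : Int) = 0 := by simp [List.count_eq_zero_of_not_mem hxl]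
        simp [hc0]
      rw [h1, h2]

theorem sum_of_squares_of_primes_eq_alt (numbers : List Int) :
    sum_of_squares_of_primes numbers = sum_of_squares_of_primes_alt numbers := by
  have hB : sum_of_squares_of_primes_alt numbers
      = ((PySem.Dict.counter numbers).items).foldl
          (fun total p => if pvIsPrimeB p.1 then total + p.2 * p.1 * p.1 else total) 0 := rfl
  rw [hB, PySem.Dict.items_counter, List.foldl_map]
  show sum_of_squares_of_primes numbers
      = (PySem.Set.ofList numbers).foldl
          (fun total k => if pvIsPrimeB k then total + (List.count k numbers : Int) * k * k else total) 0
  rw [PySem.List.foldl_if_eq_foldl_filter (fun k => pvIsPrimeB k)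
        (fun (total : Int) k => total + (List.count k numbers : Int) * k * k),
      PySem.List.foldl_add, zero_add, pvSumFilter]
  have hpt : (List.map (fun x => if pvIsPrimeB x = true then (List.count x numbers : Int) * x * x else 0)
        (PySem.Set.ofList numbers))
      = (List.map (fun k => (List.count k numbers : Int) * (if pvIsPrimeB k = true then k * k else 0))
        (PySem.Set.ofList numbers)) := by
    apply List.map_congr_left
    intro k _
    by_cases h : pvIsPrimeB k
    · simp only [h, if_pos]
      ring
    · simp [h]
  rw [hpt, pvSumCount numbers (fun k => if pvIsPrimeB k = true then k * k else 0)]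
  rw [sum_of_squares_of_primes, List.filter_congr (fun x _ => pvPrime_eq x), pvSumFilter]
  apply congrArg
  apply List.map_congr_left
  intro k _
  by_cases h : pvIsPrimeB k
  · simp only [h, if_pos]
    ring
  · simp [h]

-- ===== VERDICT (by name: the statement is the Claim_ definition above) =====
theorem sum_of_squares_of_primes_spec : Claim_equal_sum_of_squares_of_primes := by
  intro numbers _
  exact sum_of_squares_of_primes_eq_alt numbers
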